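-- pv_equiv track=rewrite | github.com/TimeDevBlocker/soho-comet-pipeline | detect.py | GenerateMapListDetections
-- ===== SOURCE A (Python) =====
-- def AllocEmptyMapList(w, h):
--     return [ [ [] for i in range(w) ] for j in range(h) ]
--
-- def GenerateMapListDetections(img, width, height, grid_size):
--
--     w = int(width / grid_size) + 1
--     h = int(height/ grid_size) + 1
--
--     map_detect_list = AllocEmptyMapList(w, h)
--
--     j=0
--     while (j<height):
--
--         i = 0
--         while (i<width):
--
--             v1 = img[j][i]
--
--             if (v1 <= 0):
--                 i = i+1
--                 continue
--
--             ii = int(i/grid_size)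
--             jj = int(j/grid_size)
--
--             map_detect_list[jj][ii].append((i,j))
--
--             i = i + 1
--         j = j + 1
--
--     return map_detect_list
-- ===== SOURCE B (Python) =====
-- def GenerateMapListDetections(img, width, height, grid_size):
--     w = int(width / grid_size) + 1
--     h = int(height / grid_size) + 1
--     out = []
--     for jj in range(h):
--         row = []
--         for ii in range(w):
--             cell = []
--             for j in range(jj * grid_size, min((jj + 1) * grid_size, height)):
--                 for i in range(ii * grid_size, min((ii + 1) * grid_size, width)):
--                     if img[j][i] > 0:
--                         cell.append((i, j))
--             row.append(cell)
--         out.append(row)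
--     return out
-- ===== Notes on version B (the rewrite author's own statement) =====
-- stated objective: alternative
-- what changed: B iterates over grid cells and scans only each cell's clamped pixel block, building every cell list by construction, instead of A's flat row-major pixel scan that divides each pixel's coordinates to locate its cell in a pre-allocated mutable grid.
-- outside the precondition, e.g. on GenerateMapListDetections([[1]], 1, 1, -2): A returns [[[(0, 0)]]], B returns [[[]]]
import Mathlib
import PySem

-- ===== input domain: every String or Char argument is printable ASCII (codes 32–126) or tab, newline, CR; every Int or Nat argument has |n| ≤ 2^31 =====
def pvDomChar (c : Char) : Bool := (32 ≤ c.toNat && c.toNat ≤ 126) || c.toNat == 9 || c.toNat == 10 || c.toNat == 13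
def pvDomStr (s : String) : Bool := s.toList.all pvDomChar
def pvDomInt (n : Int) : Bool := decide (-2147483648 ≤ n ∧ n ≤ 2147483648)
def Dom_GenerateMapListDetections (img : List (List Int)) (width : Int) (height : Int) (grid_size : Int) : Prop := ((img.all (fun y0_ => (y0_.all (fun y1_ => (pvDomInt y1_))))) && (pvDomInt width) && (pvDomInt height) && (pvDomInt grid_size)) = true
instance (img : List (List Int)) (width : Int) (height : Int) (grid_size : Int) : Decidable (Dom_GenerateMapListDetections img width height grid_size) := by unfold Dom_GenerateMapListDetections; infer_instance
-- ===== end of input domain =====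

-- B re-implements the binning by iterating over grid cells and scanning each cell's clamped
-- pixel block (membership by construction), instead of A's flat row-major pixel scan that
-- divides every pixel's coordinates into a pre-allocated mutable grid; objective: alternative
-- (same asymptotic cost).  A mutates only its own local list; no argument is mutated.

-- ===== PORT A =====
-- img[j][i]: Python raises IndexError out of range; Pre_ restricts to in-range accesses, so the
-- default-0 read is exact there.
def pvPixel (img : List (List Int)) (j i : Int) : Int :=
  PySem.List.pyGetD (PySem.List.pyGetD img j []) i 0

-- map_detect_list[jj][ii].append((i,j)): functional update of the nested list; exact for the
-- nonnegative in-range indices Pre_ guarantees.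
def pvAppendAt (m : List (List (List (Int × Int)))) (jj ii : Int) (p : Int × Int) :
    List (List (List (Int × Int))) :=
  m.set jj.toNat
    ((PySem.List.pyGetD m jj []).set ii.toNat
      (PySem.List.pyGetD (PySem.List.pyGetD m jj []) ii [] ++ [p]))

def AllocEmptyMapList (w h : Int) : List (List (List (Int × Int))) :=
  (PySem.List.pyRange 0 h 1).map (fun _ => (PySem.List.pyRange 0 w 1).map (fun _ => ([] : List (Int × Int))))

-- int(width / grid_size): float true division then truncation toward zero = Int.tdiv, exact on
-- the |n| ≤ 2^31 domain (the float quotient never rounds across an integer there).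
-- The two while loops with counters i=i+1 / j=j+1 are folds over range(0, bound).
def GenerateMapListDetections (img : List (List Int)) (width : Int) (height : Int) (grid_size : Int) : List (List (List (Int × Int))) :=
  let w := Int.tdiv width grid_size + 1
  let h := Int.tdiv height grid_size + 1
  let map_detect_list := AllocEmptyMapList w h
  (PySem.List.pyRange 0 height 1).foldl (fun m j =>
    (PySem.List.pyRange 0 width 1).foldl (fun m i =>
      let v1 := pvPixel img j i
      if v1 ≤ 0 then m
      else pvAppendAt m (Int.tdiv j grid_size) (Int.tdiv i grid_size) (i, j)) m) map_detect_list

-- ===== PORT B =====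
-- B keeps A's grid sizing int(width / grid_size) + 1 (float true division then truncation
-- toward zero = Int.tdiv, exact on the |n| ≤ 2^31 domain).
def GenerateMapListDetections_alt (img : List (List Int)) (width : Int) (height : Int) (grid_size : Int) : List (List (List (Int × Int))) :=
  let w := Int.tdiv width grid_size + 1
  let h := Int.tdiv height grid_size + 1
  (PySem.List.pyRange 0 h 1).map (fun jj =>
    (PySem.List.pyRange 0 w 1).map (fun ii =>
      (PySem.List.pyRange (jj * grid_size) (min ((jj + 1) * grid_size) height) 1).foldl (fun cell j =>
        (PySem.List.pyRange (ii * grid_size) (min ((ii + 1) * grid_size) width) 1).foldl (fun cell i =>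
          if 0 < pvPixel img j i then cell ++ [(i, j)] else cell) cell) ([] : List (Int × Int))))

-- ===== PRECONDITION & SPEC =====
-- Pre_ excludes: grid_size = 0 (A raises ZeroDivisionError); images smaller than a positive
-- height×width scan region (A raises IndexError there); and negative grid_size combined with a
-- positive scan region, where A either raises IndexError or bins pixels through Python
-- negative-index wraparound, an accident of the implementation.
def Pre_GenerateMapListDetections (img : List (List Int)) (width : Int) (height : Int) (grid_size : Int) : Prop :=
  grid_size ≠ 0 ∧ (width ≤ 0 ∨ height ≤ 0 ∨
    (0 < grid_size ∧ height ≤ (img.length : Int) ∧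
      ∀ row ∈ img.take height.toNat, width ≤ (row.length : Int)))
instance (img : List (List Int)) (width : Int) (height : Int) (grid_size : Int) : Decidable (Pre_GenerateMapListDetections img width height grid_size) := by unfold Pre_GenerateMapListDetections; infer_instance

def pvWitness_GenerateMapListDetections : List (List Int) × Int × Int × Int :=
  ([[1, 0], [0, 2]], 2, 2, 2)

def Spec_GenerateMapListDetections (img : List (List Int)) (width : Int) (height : Int) (grid_size : Int) (out : List (List (List (Int × Int)))) : Prop := out = GenerateMapListDetections_alt img width height grid_size
instance (img : List (List Int)) (width : Int) (height : Int) (grid_size : Int) (out : List (List (List (Int × Int)))) : Decidable (Spec_GenerateMapListDetections img width height grid_size out) := by unfold Spec_GenerateMapListDetections; infer_instance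

-- ===== CLAIM (what is proved, stated in full; the proofs are below) =====
def Claim_equal_GenerateMapListDetections : Prop := ∀ (img : List (List Int)) (width : Int) (height : Int) (grid_size : Int), Dom_GenerateMapListDetections img width height grid_size → Pre_GenerateMapListDetections img width height grid_size → Spec_GenerateMapListDetections img width height grid_size (GenerateMapListDetections img width height grid_size)

-- ===== LEMMAS AND PROOFS =====

-- the row-major pixel order A scans
def pvPairs (width height : Int) : List (Int × Int) :=
  (PySem.List.pyRange 0 height 1).flatMap (fun j => (PySem.List.pyRange 0 width 1).map (fun i => (i, j)))

def pvStepA (g : Int) (img : List (List Int)) (m : List (List (List (Int × Int)))) (p : Int × Int) :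
    List (List (List (Int × Int))) :=
  if pvPixel img p.2 p.1 ≤ 0 then m
  else pvAppendAt m (Int.tdiv p.2 g) (Int.tdiv p.1 g) p

def pvShape (m : List (List (List (Int × Int)))) (hN wN : Nat) : Prop :=
  m.length = hN ∧ ∀ r ∈ m, r.length = wN

def cellAt (m : List (List (List (Int × Int)))) (a b : Nat) : List (Int × Int) :=
  (m.getD a []).getD b []

lemma pvFlatMap_congr_mem {α β : Type} (l : List α) (f g : α → List β)
    (h : ∀ a ∈ l, f a = g a) : l.flatMap f = l.flatMap g := by
  induction l with
  | nil => rfl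
  | cons x t ih =>
    simp only [List.flatMap_cons, h x (List.mem_cons_self ..), ih (fun a ha => h a (List.mem_cons_of_mem _ ha))]

lemma pvFlatMap_filter_of_nil {α β : Type} (l : List α) (q : α → Bool) (F : α → List β)
    (h : ∀ x ∈ l, q x = false → F x = []) : l.flatMap F = (l.filter q).flatMap F := by
  induction l with
  | nil => rfl
  | cons x t ih =>
    rw [List.flatMap_cons, List.filter_cons]
    by_cases hq : q x
    · rw [if_pos hq, List.flatMap_cons, ih (fun a ha => h a (List.mem_cons_of_mem _ ha))]
    · rw [if_neg hq, h x (List.mem_cons_self ..) (by simpa using hq),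
        ih (fun a ha => h a (List.mem_cons_of_mem _ ha)), List.nil_append]

lemma pvA_eq_pairs_fold (img : List (List Int)) (width height g : Int) :
    GenerateMapListDetections img width height g
      = (pvPairs width height).foldl (pvStepA g img)
          (AllocEmptyMapList (Int.tdiv width g + 1) (Int.tdiv height g + 1)) := by
  simp only [GenerateMapListDetections, pvPairs, pvStepA, List.foldl_flatMap, List.foldl_map]

lemma pvCellAt_alloc (w h : Int) (a b : Nat) : cellAt (AllocEmptyMapList w h) a b = [] := by
  unfold cellAt
  have hrow : ∀ c ∈ (AllocEmptyMapList w h).getD a [], c = [] := by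
    intro c hc
    by_cases ha : a < (AllocEmptyMapList w h).length
    · rw [List.getD_eq_getElem _ _ ha] at hc
      unfold AllocEmptyMapList at hc
      rw [List.getElem_map] at hc
      obtain ⟨-, -, rfl⟩ := List.mem_map.mp hc
      rfl
    · rw [List.getD_eq_default _ _ (Nat.le_of_not_lt ha)] at hc
      cases hc
  by_cases hb : b < ((AllocEmptyMapList w h).getD a []).length
  · rw [List.getD_eq_getElem _ _ hb]
    exact hrow _ (List.getElem_mem hb)
  · exact List.getD_eq_default _ _ (Nat.le_of_not_lt hb)

lemma pvShape_alloc (w h : Int) : pvShape (AllocEmptyMapList w h) h.toNat w.toNat := by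
  constructor
  · simp [AllocEmptyMapList, PySem.List.length_pyRange_one]
  · intro r hr
    simp only [AllocEmptyMapList, List.mem_map] at hr
    obtain ⟨x, -, rfl⟩ := hr
    simp [PySem.List.length_pyRange_one]

lemma pvShape_appendAt (m : List (List (List (Int × Int)))) (jj ii : Int) (p : Int × Int)
    (hjj : 0 ≤ jj) (hN wN : Nat) (hs : pvShape m hN wN) :
    pvShape (pvAppendAt m jj ii p) hN wN := by
  by_cases hc : jj.toNat < m.length
  · obtain ⟨hlen, hrow⟩ := hs
    constructor
    · simpa [pvAppendAt, List.length_set] using hlen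
    · intro r hr
      rcases List.mem_or_eq_of_mem_set hr with h | rfl
      · exact hrow r h
      · rw [List.length_set, PySem.List.pyGetD_of_nonneg m [] hjj, List.getD_eq_getElem _ _ hc]
        exact hrow _ (List.getElem_mem hc)
  · unfold pvAppendAt
    rw [List.set_eq_of_length_le (by omega)]
    exact hs

lemma pvCellAt_appendAt (m : List (List (List (Int × Int)))) (jj ii : Int) (p : Int × Int)
    (hjj : 0 ≤ jj) (hii : 0 ≤ ii) (hjl : jj.toNat < m.length)
    (hil : ii.toNat < (m.getD jj.toNat []).length) (a b : Nat) :
    cellAt (pvAppendAt m jj ii p) a b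
      = if a = jj.toNat ∧ b = ii.toNat then cellAt m a b ++ [p] else cellAt m a b := by
  unfold cellAt pvAppendAt
  rw [PySem.List.pyGetD_of_nonneg m [] hjj, PySem.List.pyGetD_of_nonneg _ [] hii]
  by_cases hA : a = jj.toNat
  · subst hA
    rw [List.getD_eq_getElem?_getD (l := List.set m _ _), List.getElem?_set, if_pos rfl, if_pos hjl]
    simp only [Option.getD_some]
    by_cases hB : b = ii.toNat
    · subst hB
      rw [List.getD_eq_getElem?_getD (l := List.set _ _ _), List.getElem?_set, if_pos rfl, if_pos hil]
      simp
    · rw [if_neg (by tauto)]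
      rw [List.getD_eq_getElem?_getD (l := List.set _ _ _), List.getElem?_set,
        if_neg (by omega), ← List.getD_eq_getElem?_getD]
  · rw [if_neg (by tauto)]
    rw [List.getD_eq_getElem?_getD (l := List.set m _ _), List.getElem?_set,
      if_neg (by omega), ← List.getD_eq_getElem?_getD]

lemma pvShape_foldA (g : Int) (img : List (List Int)) (L : List (Int × Int))
    (m : List (List (List (Int × Int)))) (hN wN : Nat) (hs : pvShape m hN wN)
    (hmem : ∀ p ∈ L, 0 ≤ Int.tdiv p.2 g) :
    pvShape (L.foldl (pvStepA g img) m) hN wN := by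
  induction L generalizing m with
  | nil => exact hs
  | cons p t ih =>
    rw [List.foldl_cons]
    refine ih _ ?_ (fun q hq => hmem q (List.mem_cons_of_mem _ hq))
    unfold pvStepA
    split
    · exact hs
    · exact pvShape_appendAt _ _ _ _ (hmem p (List.mem_cons_self ..)) _ _ hs

lemma pvCellAt_foldA (g : Int) (img : List (List Int)) (L : List (Int × Int))
    (m : List (List (List (Int × Int)))) (hN wN : Nat) (hs : pvShape m hN wN)
    (hmem : ∀ p ∈ L, 0 ≤ Int.tdiv p.2 g ∧ 0 ≤ Int.tdiv p.1 g ∧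
      (Int.tdiv p.2 g).toNat < hN ∧ (Int.tdiv p.1 g).toNat < wN)
    (a b : Nat) :
    cellAt (L.foldl (pvStepA g img) m) a b
      = cellAt m a b ++ L.filter (fun p => decide (0 < pvPixel img p.2 p.1 ∧
          (Int.tdiv p.2 g).toNat = a ∧ (Int.tdiv p.1 g).toNat = b)) := by
  induction L generalizing m with
  | nil => simp
  | cons p t ih =>
    obtain ⟨h1, h2, h3, h4⟩ := hmem p (List.mem_cons_self ..)
    have hshape' : pvShape (pvStepA g img m p) hN wN := by
      unfold pvStepA; split
      · exact hs
      · exact pvShape_appendAt _ _ _ _ h1 _ _ hs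
    rw [List.foldl_cons, ih _ hshape' (fun q hq => hmem q (List.mem_cons_of_mem _ hq)),
      List.filter_cons]
    by_cases hpix : pvPixel img p.2 p.1 ≤ 0
    · have hstep : pvStepA g img m p = m := by unfold pvStepA; rw [if_pos hpix]
      rw [hstep, if_neg (by simp only [decide_eq_true_eq]; rintro ⟨h0, -⟩; omega)]
    · have hstep : pvStepA g img m p
          = pvAppendAt m (Int.tdiv p.2 g) (Int.tdiv p.1 g) p := by
        unfold pvStepA; rw [if_neg hpix]
      have hjl : (Int.tdiv p.2 g).toNat < m.length := by rw [hs.1]; exact h3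
      have hil : (Int.tdiv p.1 g).toNat < (m.getD (Int.tdiv p.2 g).toNat []).length := by
        rw [List.getD_eq_getElem _ _ hjl, hs.2 _ (List.getElem_mem hjl)]
        exact h4
      rw [hstep, pvCellAt_appendAt m _ _ p h1 h2 hjl hil a b]
      have hpix' : 0 < pvPixel img p.2 p.1 := by omega
      by_cases hab : a = (Int.tdiv p.2 g).toNat ∧ b = (Int.tdiv p.1 g).toNat
      · rw [if_pos hab, if_pos (decide_eq_true ⟨hpix', hab.1.symm, hab.2.symm⟩)]
        simp [List.append_assoc]
      · rw [if_neg hab,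
          if_neg (by simp only [decide_eq_true_eq]; rintro ⟨-, e1, e2⟩; exact hab ⟨e1.symm, e2.symm⟩)]

-- filter of a unit range by an interval condition is the clamped intersection range
lemma pvFilter_between (lo hi a b : Int) :
    (PySem.List.pyRange lo hi 1).filter (fun x => decide (a ≤ x ∧ x < b))
      = PySem.List.pyRange (max lo a) (min hi b) 1 := by
  by_cases h : hi ≤ lo
  · rw [PySem.List.pyRange_one_eq_nil h,
      PySem.List.pyRange_one_eq_nil (by omega : min hi b ≤ max lo a)]
    rfl
  · rw [PySem.List.pyRange_one_cons (by omega : lo < hi), List.filter_cons]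
    have IH := pvFilter_between (lo + 1) hi a b
    by_cases hk : a ≤ lo ∧ lo < b
    · rw [if_pos (by simpa using hk), IH]
      have h2 : max (lo + 1) a = lo + 1 := by omega
      have h1 : max lo a = lo := by omega
      rw [h1, h2, PySem.List.pyRange_one_cons (by omega : lo < min hi b)]
    · rw [if_neg (by simpa using hk), IH]
      by_cases hla : lo < a
      · congr 1
        omega
      · rw [PySem.List.pyRange_one_eq_nil (by omega),
          PySem.List.pyRange_one_eq_nil (by omega)]
  termination_by (hi - lo).toNat
  decreasing_by omega

lemma pvB_flatMap (img : List (List Int)) (width height g : Int) :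
    GenerateMapListDetections_alt img width height g
      = (PySem.List.pyRange 0 (Int.tdiv height g + 1) 1).map (fun jj =>
          (PySem.List.pyRange 0 (Int.tdiv width g + 1) 1).map (fun ii =>
            (PySem.List.pyRange (jj * g) (min ((jj + 1) * g) height) 1).flatMap (fun j =>
              ((PySem.List.pyRange (ii * g) (min ((ii + 1) * g) width) 1).filter
                (fun i => decide (0 < pvPixel img j i))).map (fun i => (i, j))))) := by
  simp only [GenerateMapListDetections_alt]
  refine List.map_congr_left (fun jj _ => List.map_congr_left (fun ii _ => ?_))
  rw [PySem.List.foldl_congr_mem _ _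
        (fun cell j => cell ++ ((PySem.List.pyRange (ii * g) (min ((ii + 1) * g) width) 1).filter
          (fun i => decide (0 < pvPixel img j i))).map (fun i => (i, j))) _
        (fun cell j _ => PySem.List.foldl_append_ite _ _ _ _),
      PySem.List.foldl_append_eq_flatMap, List.nil_append]

-- on an empty scan region both programs return the empty grid of the same dimensions
lemma pvDegenerate (img : List (List Int)) (width height g : Int) (hg : g ≠ 0)
    (hdeg : width ≤ 0 ∨ height ≤ 0) :
    GenerateMapListDetections img width height g
      = GenerateMapListDetections_alt img width height g := by
  rw [pvA_eq_pairs_fold]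
  have hpairs : pvPairs width height = [] := by
    unfold pvPairs
    rcases hdeg with hw | hh
    · rw [List.flatMap_eq_nil_iff]
      intro l hl
      obtain ⟨j, -, rfl⟩ := List.mem_map.mp hl
      rw [PySem.List.pyRange_one_eq_nil (by omega : width ≤ 0), List.map_nil]
    · rw [PySem.List.pyRange_one_eq_nil (by omega : height ≤ 0), List.flatMap_nil]
  rw [hpairs, List.foldl_nil, pvB_flatMap]
  unfold AllocEmptyMapList
  refine List.map_congr_left (fun jj hjj => List.map_congr_left (fun ii hii => ?_))
  have hjj0 := (PySem.List.mem_pyRange_one.mp hjj).1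
  have hii0 := (PySem.List.mem_pyRange_one.mp hii).1
  have hmulj : (jj + 1) * g = jj * g + g := by ring
  have hmuli : (ii + 1) * g = ii * g + g := by ring
  symm
  rcases lt_or_gt_of_ne hg with hneg | hpos
  · rw [PySem.List.pyRange_one_eq_nil (by omega : min ((jj + 1) * g) height ≤ jj * g),
      List.flatMap_nil]
  · rcases hdeg with hw | hh
    · rw [List.flatMap_eq_nil_iff]
      intro j hj
      have hi0 : 0 ≤ ii * g := mul_nonneg hii0 (le_of_lt hpos)
      rw [PySem.List.pyRange_one_eq_nil (by omega : min ((ii + 1) * g) width ≤ ii * g),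
        List.filter_nil, List.map_nil]
    · have hj0 : 0 ≤ jj * g := mul_nonneg hjj0 (le_of_lt hpos)
      rw [PySem.List.pyRange_one_eq_nil (by omega : min ((jj + 1) * g) height ≤ jj * g),
        List.flatMap_nil]

-- ===== VERDICT (by name: the statement is the Claim_ definition above) =====
theorem GenerateMapListDetections_spec : Claim_equal_GenerateMapListDetections := by
  intro img width height g hdom hpre
  obtain ⟨hgne, hcase⟩ := hpre
  unfold Spec_GenerateMapListDetections
  by_cases hdeg : width ≤ 0 ∨ height ≤ 0
  · exact pvDegenerate img width height g hgne hdeg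
  · obtain ⟨hg, -, -⟩ : 0 < g ∧ height ≤ (img.length : Int) ∧
        ∀ row ∈ img.take height.toNat, width ≤ (row.length : Int) := by
      rcases hcase with h | h | h
      · exact absurd (Or.inl h) hdeg
      · exact absurd (Or.inr h) hdeg
      · exact h
    have hw0 : (0 : Int) ≤ width := by omega
    have hh0 : (0 : Int) ≤ height := by omega
    have hwq0 : 0 ≤ width / g := Int.ediv_nonneg hw0 (le_of_lt hg)
    have hhq0 : 0 ≤ height / g := Int.ediv_nonneg hh0 (le_of_lt hg)
    -- the division bracket, as a single iff
    have hdiv_iff : ∀ (x : Int) (c : Nat), 0 ≤ x →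
        ((Int.tdiv x g).toNat = c ↔ ((c : Int) * g ≤ x ∧ x < ((c : Int) + 1) * g)) := by
      intro x c hx
      rw [Int.tdiv_eq_ediv_of_nonneg hx, ← PySem.Int.floordiv_eq_ediv_of_pos hg]
      have h0 : 0 ≤ PySem.Int.floordiv x g := by
        rw [PySem.Int.floordiv_eq_ediv_of_pos hg]; exact Int.ediv_nonneg hx (le_of_lt hg)
      rw [show ((PySem.Int.floordiv x g).toNat = c) ↔ (PySem.Int.floordiv x g = (c : Int)) from by omega]
      exact PySem.Int.floordiv_eq_iff_of_pos hg
    have hpair : ∀ p ∈ pvPairs width height, 0 ≤ p.1 ∧ p.1 < width ∧ 0 ≤ p.2 ∧ p.2 < height := by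
      intro p hp
      simp only [pvPairs, List.mem_flatMap, List.mem_map] at hp
      obtain ⟨j, hj, i, hi, rfl⟩ := hp
      have hj' := PySem.List.mem_pyRange_one.mp hj
      have hi' := PySem.List.mem_pyRange_one.mp hi
      exact ⟨hi'.1, hi'.2, hj'.1, hj'.2⟩
    have hmemdiv : ∀ p ∈ pvPairs width height, 0 ≤ Int.tdiv p.2 g ∧ 0 ≤ Int.tdiv p.1 g ∧
        (Int.tdiv p.2 g).toNat < (height / g + 1).toNat ∧
        (Int.tdiv p.1 g).toNat < (width / g + 1).toNat := by
      intro p hp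
      obtain ⟨h1, h2, h3, h4⟩ := hpair p hp
      have e2 : Int.tdiv p.2 g = p.2 / g := Int.tdiv_eq_ediv_of_nonneg h3
      have e1 : Int.tdiv p.1 g = p.1 / g := Int.tdiv_eq_ediv_of_nonneg h1
      have d2 : p.2 / g ≤ height / g := Int.ediv_le_ediv hg (le_of_lt h4)
      have d1 : p.1 / g ≤ width / g := Int.ediv_le_ediv hg (le_of_lt h2)
      have n2 : 0 ≤ p.2 / g := Int.ediv_nonneg h3 (le_of_lt hg)
      have n1 : 0 ≤ p.1 / g := Int.ediv_nonneg h1 (le_of_lt hg)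
      rw [e1, e2]
      refine ⟨n2, n1, by omega, by omega⟩
    have hAfold := pvA_eq_pairs_fold img width height g
    rw [Int.tdiv_eq_ediv_of_nonneg hw0, Int.tdiv_eq_ediv_of_nonneg hh0] at hAfold
    have hshapeA : pvShape (GenerateMapListDetections img width height g)
        (height / g + 1).toNat (width / g + 1).toNat := by
      rw [hAfold]
      exact pvShape_foldA _ _ _ _ _ _ (pvShape_alloc _ _) (fun p hp => (hmemdiv p hp).1)
    have hAcell : ∀ a b : Nat, cellAt (GenerateMapListDetections img width height g) a b
        = (pvPairs width height).filter (fun p => decide (0 < pvPixel img p.2 p.1 ∧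
            (Int.tdiv p.2 g).toNat = a ∧ (Int.tdiv p.1 g).toNat = b)) := by
      intro a b
      rw [hAfold, pvCellAt_foldA g img _ _ _ _ (pvShape_alloc _ _) hmemdiv a b, pvCellAt_alloc,
        List.nil_append]
    -- the filtered row-major pixel list IS the tile-by-tile scan
    have key : ∀ a b : Nat,
        (pvPairs width height).filter (fun p => decide (0 < pvPixel img p.2 p.1 ∧
            (Int.tdiv p.2 g).toNat = a ∧ (Int.tdiv p.1 g).toNat = b))
          = (PySem.List.pyRange ((a : Int) * g) (min (((a : Int) + 1) * g) height) 1).flatMap (fun j =>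
              ((PySem.List.pyRange ((b : Int) * g) (min (((b : Int) + 1) * g) width) 1).filter
                (fun i => decide (0 < pvPixel img j i))).map (fun i => (i, j))) := by
      intro a b
      unfold pvPairs
      rw [List.filter_flatMap]
      have hstep1 : ∀ j : Int,
          List.filter (fun p => decide (0 < pvPixel img p.2 p.1 ∧
              (Int.tdiv p.2 g).toNat = a ∧ (Int.tdiv p.1 g).toNat = b))
            ((PySem.List.pyRange 0 width 1).map (fun i => (i, j)))
            = ((PySem.List.pyRange 0 width 1).filter (fun i => decide (0 < pvPixel img j i ∧
                (Int.tdiv j g).toNat = a ∧ (Int.tdiv i g).toNat = b))).map (fun i => (i, j)) := by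
        intro j
        rw [List.filter_map]
        rfl
      rw [pvFlatMap_congr_mem _ _ _ (fun j _ => hstep1 j)]
      have hnil : ∀ j ∈ PySem.List.pyRange 0 height 1,
          (fun j => decide ((a : Int) * g ≤ j ∧ j < ((a : Int) + 1) * g)) j = false →
          ((PySem.List.pyRange 0 width 1).filter (fun i => decide (0 < pvPixel img j i ∧
              (Int.tdiv j g).toNat = a ∧ (Int.tdiv i g).toNat = b))).map (fun i => (i, j)) = [] := by
        intro j hj hfalse
        have hj0 := (PySem.List.mem_pyRange_one.mp hj).1
        have hnot : ¬((a : Int) * g ≤ j ∧ j < ((a : Int) + 1) * g) := by simpa using hfalse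
        have hne : (Int.tdiv j g).toNat ≠ a := fun he => hnot ((hdiv_iff j a hj0).mp he)
        rw [List.filter_eq_nil_iff.mpr
          (fun i _ => by simp only [decide_eq_true_eq]; rintro ⟨-, hja, -⟩; exact hne hja),
          List.map_nil]
      rw [pvFlatMap_filter_of_nil _ _ _ hnil, pvFilter_between,
        max_eq_right (mul_nonneg (Int.natCast_nonneg a) (le_of_lt hg)),
        min_comm height (((a : Int) + 1) * g)]
      refine pvFlatMap_congr_mem _ _ _ (fun j hj => ?_)
      have hjint := PySem.List.mem_pyRange_one.mp hj
      have hj0 : 0 ≤ j := le_trans (mul_nonneg (Int.natCast_nonneg a) (le_of_lt hg)) hjint.1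
      have hja : (Int.tdiv j g).toNat = a :=
        (hdiv_iff j a hj0).mpr ⟨hjint.1, lt_of_lt_of_le hjint.2 (min_le_left _ _)⟩
      have hfc : ∀ i ∈ PySem.List.pyRange 0 width 1,
          (decide (0 < pvPixel img j i ∧ (Int.tdiv j g).toNat = a ∧ (Int.tdiv i g).toNat = b))
            = (decide (0 < pvPixel img j i) && decide ((b : Int) * g ≤ i ∧ i < ((b : Int) + 1) * g)) := by
        intro i hi
        have hi0 := (PySem.List.mem_pyRange_one.mp hi).1
        have hb := hdiv_iff i b hi0
        by_cases h1 : 0 < pvPixel img j i <;>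
          by_cases h2 : (b : Int) * g ≤ i ∧ i < ((b : Int) + 1) * g <;>
            simp [h1, h2, hja, hb]
      rw [List.filter_congr hfc, ← List.filter_filter, pvFilter_between,
        max_eq_right (mul_nonneg (Int.natCast_nonneg b) (le_of_lt hg)),
        min_comm width (((b : Int) + 1) * g)]
    -- assemble: both sides cell by cell
    rw [pvB_flatMap, Int.tdiv_eq_ediv_of_nonneg hw0, Int.tdiv_eq_ediv_of_nonneg hh0]
    refine List.ext_getElem ?_ ?_
    · rw [hshapeA.1, List.length_map, PySem.List.length_pyRange_one]
      omega
    · intro n h1 h2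
      refine List.ext_getElem ?_ ?_
      · rw [hshapeA.2 _ (List.getElem_mem h1), List.getElem_map, List.length_map,
          PySem.List.length_pyRange_one]
        omega
      · intro mB hb1 hb2
        have hacell : (GenerateMapListDetections img width height g)[n][mB]
            = cellAt (GenerateMapListDetections img width height g) n mB := by
          unfold cellAt
          rw [List.getD_eq_getElem _ _ h1, List.getD_eq_getElem _ _ hb1]
        rw [hacell, hAcell n mB, key n mB]
        simp only [List.getElem_map, PySem.List.getElem_pyRange_one, zero_add]
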